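-- pv_equiv track=rewrite | github.com/maxwell-dantas/Prog-Computadores | Codeforces/Lista 10/F.py | ordem_cores
-- ===== SOURCE A (Python) =====
-- def ordem_cores(qtd_quadrados, quadrados) -> list:
--   quadrados_numerados = [10001 for x in range(qtd_quadrados)]
--   for i in range(qtd_quadrados):
--     if quadrados[i] == 0:
--       for j in range(qtd_quadrados):
--         if quadrados[j] == 0:
--           quadrados_numerados[j] = 0
--           continue
--         if abs(i - j) < quadrados_numerados[j]:
--           if abs(i - j) >= 9:
--             quadrados_numerados[j] = 9
--           else:
--             quadrados_numerados[j] = abs(i - j)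
--   return quadrados_numerados
-- ===== SOURCE B (Python) =====
-- def ordem_cores(qtd_quadrados, quadrados):
--     # Two linear passes (left-to-right and right-to-left) computing the
--     # distance to the nearest zero, then cap at 9 (10001 = no zero reachable).
--     INF = 10001
--     n = max(qtd_quadrados, 0)
--     prefix = [quadrados[i] for i in range(n)]
--     left = []
--     d = INF
--     for v in prefix:
--         if v == 0:
--             d = 0
--         elif d < INF:
--             d += 1
--         left.append(d)
--     right = []
--     d = INF
--     for v in reversed(prefix):
--         if v == 0:
--             d = 0
--         elif d < INF:
--             d += 1
--         right.append(d)
--     right.reverse()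
--     out = []
--     for l, r in zip(left, right):
--         m = l if l < r else r
--         out.append(m if m <= 9 or m >= INF else 9)
--     return out
-- ===== Notes on version B (the rewrite author's own statement) =====
-- stated objective: alternative
-- what changed: A relaxes every cell against every zero (nested index loops with capped in-place updates, O(n*z)); B computes the nearest-zero distance with two linear saturating-counter passes (left-to-right and right-to-left) and caps the result at 9 in a final pass (O(n) always).
import Mathlib
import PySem

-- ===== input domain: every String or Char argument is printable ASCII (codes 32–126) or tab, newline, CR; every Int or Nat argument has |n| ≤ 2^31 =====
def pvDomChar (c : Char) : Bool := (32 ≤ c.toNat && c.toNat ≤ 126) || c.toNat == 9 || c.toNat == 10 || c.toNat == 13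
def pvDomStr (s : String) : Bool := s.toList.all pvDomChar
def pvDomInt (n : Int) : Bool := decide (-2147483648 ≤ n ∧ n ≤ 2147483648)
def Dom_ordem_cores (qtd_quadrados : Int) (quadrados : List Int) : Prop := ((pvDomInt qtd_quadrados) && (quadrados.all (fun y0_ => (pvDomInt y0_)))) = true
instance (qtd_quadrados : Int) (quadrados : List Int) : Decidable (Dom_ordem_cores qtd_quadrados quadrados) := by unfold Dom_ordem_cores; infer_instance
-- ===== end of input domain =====

-- B replaces A's "for every zero, relax every cell" nested loops (O(n*z)) by two linear
-- saturating-counter passes (left-to-right and right-to-left) and a final cap (O(n)).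

-- ===== PORT A =====
def ordem_cores (qtd_quadrados : Int) (quadrados : List Int) : List Int :=
  let quadrados_numerados : List Int :=
    (PySem.List.pyRange 0 qtd_quadrados 1).map (fun _ => (10001 : Int))
  (PySem.List.pyRange 0 qtd_quadrados 1).foldl (fun qn i =>
    if PySem.List.pyGetD quadrados i 0 = 0 then
      (PySem.List.pyRange 0 qtd_quadrados 1).foldl (fun qn j =>
        if PySem.List.pyGetD quadrados j 0 = 0 then
          PySem.List.pySetD qn j 0
        else if |i - j| < PySem.List.pyGetD qn j 0 then
          (if 9 ≤ |i - j| then PySem.List.pySetD qn j 9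
           else PySem.List.pySetD qn j |i - j|)
        else qn) qn
    else qn) quadrados_numerados

-- ===== PORT B =====
def ordem_cores_alt (qtd_quadrados : Int) (quadrados : List Int) : List Int :=
  let n : Int := max qtd_quadrados 0
  let prefix_ : List Int :=
    (PySem.List.pyRange 0 n 1).map (fun i => PySem.List.pyGetD quadrados i 0)
  let left : List Int :=
    (prefix_.foldl (fun (p : Int × List Int) v =>
      let d := if v = 0 then 0 else if p.1 < 10001 then p.1 + 1 else p.1
      (d, p.2 ++ [d])) ((10001 : Int), ([] : List Int))).2
  let right : List Int :=
    ((prefix_.reverse.foldl (fun (p : Int × List Int) v =>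
      let d := if v = 0 then 0 else if p.1 < 10001 then p.1 + 1 else p.1
      (d, p.2 ++ [d])) ((10001 : Int), ([] : List Int))).2).reverse
  (left.zip right).foldl (fun out lr =>
    let m := if lr.1 < lr.2 then lr.1 else lr.2
    out ++ [if m ≤ 9 ∨ 10001 ≤ m then m else 9]) []

-- ===== PRECONDITION & SPEC =====
-- Pre_ excludes exactly the inputs where A raises IndexError: qtd_quadrados > len(quadrados).
def Pre_ordem_cores (qtd_quadrados : Int) (quadrados : List Int) : Prop :=
  qtd_quadrados ≤ (quadrados.length : Int)
instance (qtd_quadrados : Int) (quadrados : List Int) : Decidable (Pre_ordem_cores qtd_quadrados quadrados) := by unfold Pre_ordem_cores; infer_instance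
def pvWitness_ordem_cores : Int × List Int := (5, [1, 0, 2, 2, 0])

def Spec_ordem_cores (qtd_quadrados : Int) (quadrados : List Int) (out : List Int) : Prop := out = ordem_cores_alt qtd_quadrados quadrados
instance (qtd_quadrados : Int) (quadrados : List Int) (out : List Int) : Decidable (Spec_ordem_cores qtd_quadrados quadrados out) := by unfold Spec_ordem_cores; infer_instance

-- ===== CLAIM (what is proved, stated in full; the proofs are below) =====
def Claim_equal_ordem_cores : Prop := ∀ (qtd_quadrados : Int) (quadrados : List Int), Dom_ordem_cores qtd_quadrados quadrados → Pre_ordem_cores qtd_quadrados quadrados → Spec_ordem_cores qtd_quadrados quadrados (ordem_cores qtd_quadrados quadrados)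

-- ===== LEMMAS AND PROOFS =====

-- generic guarded-min fold
def pvF (p : Nat → Prop) [DecidablePred p] (c : Nat → Int) (a : Int) (l : List Nat) : Int :=
  l.foldl (fun m i => if p i then min m (c i) else m) a

theorem pvF_le_init (p : Nat → Prop) [DecidablePred p] (c : Nat → Int) :
    ∀ (l : List Nat) (a : Int), pvF p c a l ≤ a := by
  intro l
  induction l with
  | nil => intro a; simp [pvF]
  | cons x t ih =>
    intro a
    simp only [pvF, List.foldl_cons]
    refine le_trans (ih _) ?_
    split <;> simp

theorem pvF_le_mem (p : Nat → Prop) [DecidablePred p] (c : Nat → Int) :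
    ∀ (l : List Nat) (a : Int) (i : Nat), i ∈ l → p i → pvF p c a l ≤ c i := by
  intro l
  induction l with
  | nil => intro a i h; simp at h
  | cons x t ih =>
    intro a i hmem hp
    simp only [pvF, List.foldl_cons]
    rcases List.mem_cons.mp hmem with h | h
    · subst h
      refine le_trans (pvF_le_init p c t _) ?_
      simp [hp]
    · exact ih _ i h hp

theorem pvF_cases (p : Nat → Prop) [DecidablePred p] (c : Nat → Int) :
    ∀ (l : List Nat) (a : Int), pvF p c a l = a ∨ ∃ i ∈ l, p i ∧ pvF p c a l = c i := by
  intro l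
  induction l with
  | nil => intro a; left; rfl
  | cons x t ih =>
    intro a
    simp only [pvF, List.foldl_cons]
    by_cases hp : p x
    · simp only [if_pos hp]
      rcases ih (min a (c x)) with h | ⟨i, hi, hpi, h⟩
      · rcases le_total a (c x) with hle | hle
        · left; simp only [pvF] at h ⊢; rw [h, min_eq_left hle]
        · right; exact ⟨x, List.mem_cons_self, hp, by simp only [pvF] at h ⊢; rw [h, min_eq_right hle]⟩
      · right; exact ⟨i, List.mem_cons_of_mem _ hi, hpi, h⟩
    · simp only [if_neg hp]
      rcases ih a with h | ⟨i, hi, hpi, h⟩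
      · left; exact h
      · right; exact ⟨i, List.mem_cons_of_mem _ hi, hpi, h⟩

theorem pvF_shift (p : Nat → Prop) [DecidablePred p] (c : Nat → Int) :
    ∀ (l : List Nat) (a : Int), pvF p (fun i => c i + 1) (a + 1) l = pvF p c a l + 1 := by
  intro l
  induction l with
  | nil => intro a; rfl
  | cons x t ih =>
    intro a
    simp only [pvF, List.foldl_cons] at ih ⊢
    by_cases hp : p x
    · simp only [if_pos hp]
      rw [show min (a+1) (c x + 1) = min a (c x) + 1 by omega]
      exact ih _
    · simp only [if_neg hp]; exact ih _

theorem pvF_nonneg (p : Nat → Prop) [DecidablePred p] (c : Nat → Int) :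
    ∀ (l : List Nat) (a : Int), 0 ≤ a → (∀ i ∈ l, p i → 0 ≤ c i) → 0 ≤ pvF p c a l := by
  intro l
  induction l with
  | nil => intro a ha _; exact ha
  | cons x t ih =>
    intro a ha hc
    simp only [pvF, List.foldl_cons]
    apply ih
    · by_cases hp : p x
      · have := hc x List.mem_cons_self hp; simp [hp]; omega
      · simpa [hp] using ha
    · intro i hi hpi; exact hc i (List.mem_cons_of_mem _ hi) hpi

def pvClip (m : Int) : Int := if m < 9 then m else if m < 10001 then 9 else 10001

def pvMd (g : Nat → Int) (k j : Nat) : Int :=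
  pvF (fun i => g i = 0) (fun i => |(i : Int) - (j : Int)|) 10001 (List.range k)

def pvHasZ (g : Nat → Int) (k : Nat) : Bool := (List.range k).any (fun i => g i == 0)

theorem pvHasZ_iff (g : Nat → Int) (k : Nat) : pvHasZ g k = true ↔ ∃ i < k, g i = 0 := by
  simp [pvHasZ]

def pvAV (g : Nat → Int) (k j : Nat) : Int :=
  if g j = 0 ∧ pvHasZ g k = true then 0 else pvClip (pvMd g k j)

theorem pvMd_nonneg (g : Nat → Int) (k j : Nat) : 0 ≤ pvMd g k j :=
  pvF_nonneg _ _ _ _ (by norm_num) (fun i _ _ => abs_nonneg _)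

theorem pvMd_le (g : Nat → Int) (k j : Nat) : pvMd g k j ≤ 10001 :=
  pvF_le_init _ _ _ _

theorem pvMd_succ (g : Nat → Int) (k j : Nat) :
    pvMd g (k + 1) j = if g k = 0 then min (pvMd g k j) |(k : Int) - (j : Int)| else pvMd g k j := by
  simp only [pvMd, pvF, List.range_succ, List.foldl_append, List.foldl_cons, List.foldl_nil]

theorem pvMd_zero_of_self (g : Nat → Int) (n j : Nat) (hj : j < n) (hg : g j = 0) :
    pvMd g n j = 0 := by
  have h1 : pvMd g n j ≤ |(j : Int) - (j : Int)| :=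
    pvF_le_mem _ _ _ _ j (List.mem_range.mpr hj) hg
  have h2 := pvMd_nonneg g n j
  simp at h1
  omega

-- the pointwise effect of A's inner update on a cell, for a processed zero k
theorem pvAV_upd (g : Nat → Int) (k j : Nat) (hk : g k = 0) :
    (if g j = 0 then (0 : Int)
     else if |(k : Int) - (j : Int)| < pvAV g k j then
       (if (9 : Int) ≤ |(k : Int) - (j : Int)| then 9 else |(k : Int) - (j : Int)|)
     else pvAV g k j) = pvAV g (k + 1) j := by
  by_cases hj : g j = 0
  · have : pvHasZ g (k + 1) = true := (pvHasZ_iff g (k+1)).mpr ⟨k, Nat.lt_succ_self k, hk⟩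
    simp [hj, pvAV, this]
  · have hAV : pvAV g k j = pvClip (pvMd g k j) := by simp [pvAV, hj]
    have hAV' : pvAV g (k + 1) j = pvClip (pvMd g (k + 1) j) := by simp [pvAV, hj]
    rw [hAV, hAV', pvMd_succ, if_pos hk]
    have key : ∀ m a : Int, 0 ≤ m → m ≤ 10001 → 0 ≤ a →
        (if a < pvClip m then (if (9 : Int) ≤ a then 9 else a) else pvClip m) = pvClip (min m a) := by
      intro m a h1 h2 h3
      simp only [pvClip]
      split_ifs <;> omega
    simp only [hj, if_false]
    exact key _ _ (pvMd_nonneg g k j) (pvMd_le g k j) (abs_nonneg _)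

theorem pvAV_skip (g : Nat → Int) (k j : Nat) (hk : g k ≠ 0) :
    pvAV g (k + 1) j = pvAV g k j := by
  have hz : pvHasZ g (k + 1) = pvHasZ g k := by
    rcases Bool.eq_false_or_eq_true (pvHasZ g k) with h | h
    · rw [h, pvHasZ_iff]
      obtain ⟨i, hi, h0⟩ := (pvHasZ_iff g k).mp h
      exact ⟨i, Nat.lt_succ_of_lt hi, h0⟩
    · rw [h]
      rw [← Bool.not_eq_true] at h ⊢
      rw [pvHasZ_iff] at h ⊢
      rintro ⟨i, hi, h0⟩
      rcases Nat.lt_succ_iff_lt_or_eq.mp hi with h' | h'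
      · exact h ⟨i, h', h0⟩
      · exact absurd (h' ▸ h0) hk
  simp [pvAV, pvMd_succ, hk, hz]

theorem pvGetD_set_self (s : List Int) (j : Nat) (v : Int) (h : j < s.length) :
    (s.set j v).getD j 0 = v := by
  simp [List.getD_eq_getElem?_getD, List.getElem?_set_self', List.getElem?_eq_getElem h]

theorem pvGetD_set_ne (s : List Int) (m j : Nat) (v : Int) (h : ¬ j = m) :
    (s.set m v).getD j 0 = s.getD j 0 := by
  simp [List.getD_eq_getElem?_getD, List.getElem?_set_ne (by omega : m ≠ j)]

-- A's inner loop body as a list transformer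
def pvAStep (g : Nat → Int) (i : Nat) (s : List Int) (j : Nat) : List Int :=
  if g j = 0 then s.set j 0
  else if |(i : Int) - (j : Int)| < s.getD j 0 then
    (if (9 : Int) ≤ |(i : Int) - (j : Int)| then s.set j 9 else s.set j |(i : Int) - (j : Int)|)
  else s

-- A's inner update, pointwise
def pvU (g : Nat → Int) (i j : Nat) (cur : Int) : Int :=
  if g j = 0 then 0
  else if |(i : Int) - (j : Int)| < cur then
    (if (9 : Int) ≤ |(i : Int) - (j : Int)| then 9 else |(i : Int) - (j : Int)|)
  else cur

theorem pvAStep_length (g : Nat → Int) (i : Nat) (s : List Int) (j : Nat) :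
    (pvAStep g i s j).length = s.length := by
  simp only [pvAStep]; split_ifs <;> simp

theorem pvA_inner_length (g : Nat → Int) (i : Nat) :
    ∀ (m : Nat) (s : List Int), ((List.range m).foldl (pvAStep g i) s).length = s.length := by
  intro m
  induction m with
  | zero => intro s; rfl
  | succ m ih =>
    intro s
    rw [List.range_succ, List.foldl_append, List.foldl_cons, List.foldl_nil,
      pvAStep_length, ih]

theorem pvAStep_getD (g : Nat → Int) (i : Nat) (s : List Int) (m j : Nat) (hm : m < s.length) :
    (pvAStep g i s m).getD j 0 = if j = m then pvU g i m (s.getD m 0) else s.getD j 0 := by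
  by_cases hjm : j = m
  · subst hjm
    simp only [pvAStep, pvU]
    split_ifs <;> first | rfl | rw [pvGetD_set_self _ _ _ hm]
  · simp only [pvAStep, if_neg hjm]
    split_ifs <;> first | rfl | rw [pvGetD_set_ne _ _ _ _ hjm]

theorem pvA_inner_getD (g : Nat → Int) (i : Nat) :
    ∀ (m : Nat) (s : List Int), m ≤ s.length → ∀ j : Nat,
      ((List.range m).foldl (pvAStep g i) s).getD j 0 =
        if j < m then pvU g i j (s.getD j 0) else s.getD j 0 := by
  intro m
  induction m with
  | zero => intro s _ j; simp
  | succ m ih =>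
    intro s hm j
    rw [List.range_succ, List.foldl_append, List.foldl_cons, List.foldl_nil]
    have hlen : ((List.range m).foldl (pvAStep g i) s).length = s.length :=
      pvA_inner_length g i m s
    rw [pvAStep_getD g i _ m j (by omega)]
    by_cases hjm : j = m
    · subst hjm
      rw [if_pos rfl, if_pos (Nat.lt_succ_self j), ih s (by omega) j, if_neg (Nat.lt_irrefl j)]
    · rw [if_neg hjm, ih s (by omega) j]
      by_cases hj : j < m
      · rw [if_pos hj, if_pos (by omega)]
      · rw [if_neg hj, if_neg (by omega)]

-- A's whole algorithm in canonical form
def pvArun (g : Nat → Int) (n : Nat) : List Int :=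
  (List.range n).foldl
    (fun s i => if g i = 0 then (List.range n).foldl (pvAStep g i) s else s)
    ((List.range n).map (fun _ => (10001 : Int)))

theorem pvArun_inv (g : Nat → Int) (n : Nat) :
    ∀ k, ((List.range k).foldl
        (fun s i => if g i = 0 then (List.range n).foldl (pvAStep g i) s else s)
        ((List.range n).map (fun _ => (10001 : Int)))).length = n ∧
      ∀ j < n, ((List.range k).foldl
        (fun s i => if g i = 0 then (List.range n).foldl (pvAStep g i) s else s)
        ((List.range n).map (fun _ => (10001 : Int)))).getD j 0 = pvAV g k j := by
  intro k
  induction k with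
  | zero =>
    refine ⟨by simp, ?_⟩
    intro j hj
    rw [List.range_zero, List.foldl_nil, List.getD_eq_getElem _ _ (by simpa using hj)]
    simp only [List.getElem_map]
    have : pvHasZ g 0 = false := by simp [pvHasZ]
    simp [pvAV, this, pvMd, pvF, pvClip]
  | succ k ih =>
    obtain ⟨ihlen, ihval⟩ := ih
    rw [List.range_succ, List.foldl_append, List.foldl_cons, List.foldl_nil]
    by_cases hk : g k = 0
    · rw [if_pos hk]
      refine ⟨by rw [pvA_inner_length, ihlen], ?_⟩
      intro j hj
      rw [pvA_inner_getD g k n _ (by omega) j, if_pos hj, ihval j hj]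
      rw [show pvU g k j (pvAV g k j) = pvAV g (k+1) j from by
        simpa [pvU] using pvAV_upd g k j hk]
    · rw [if_neg hk]
      refine ⟨ihlen, ?_⟩
      intro j hj
      rw [ihval j hj, pvAV_skip g k j hk]

theorem pvArun_length (g : Nat → Int) (n : Nat) : (pvArun g n).length = n :=
  (pvArun_inv g n n).1

theorem pvArun_getD (g : Nat → Int) (n j : Nat) (hj : j < n) :
    (pvArun g n).getD j 0 = pvClip (pvMd g n j) := by
  rw [show (pvArun g n).getD j 0 = pvAV g n j from (pvArun_inv g n n).2 j hj]
  by_cases hg : g j = 0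
  · have hz : pvHasZ g n = true := (pvHasZ_iff g n).mpr ⟨j, hj, hg⟩
    simp [pvAV, hg, hz, pvMd_zero_of_self g n j hj hg, pvClip]
  · simp [pvAV, hg]

-- B's saturating counter
def pvStep (d v : Int) : Int := if v = 0 then 0 else if d < 10001 then d + 1 else d

def pvLd (g : Nat → Int) (t : Nat) : Int :=
  (List.range t).foldl (fun d i => pvStep d (g i)) 10001

def pvMdl (g : Nat → Int) (t : Nat) : Int :=
  pvF (fun i => g i = 0) (fun i => (t : Int) - 1 - (i : Int)) (10001 + t) (List.range t)

theorem pvMdl_nonneg (g : Nat → Int) (t : Nat) : 0 ≤ pvMdl g t :=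
  pvF_nonneg _ _ _ _ (by positivity) (fun i hi _ => by
    have : i < t := List.mem_range.mp hi
    omega)

theorem pvLd_eq (g : Nat → Int) : ∀ t : Nat, pvLd g t = min 10001 (pvMdl g t) := by
  intro t
  induction t with
  | zero => simp [pvLd, pvMdl, pvF]
  | succ t ih =>
    have hstep : pvLd g (t + 1) = pvStep (pvLd g t) (g t) := by
      simp [pvLd, List.range_succ, List.foldl_append]
    have hshift : pvMdl g (t + 1) =
        if g t = 0 then min (pvMdl g t + 1) 0 else pvMdl g t + 1 := by
      simp only [pvMdl, pvF, List.range_succ, List.foldl_append, List.foldl_cons, List.foldl_nil]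
      have hc : ∀ m : Int,
          (List.range t).foldl (fun m i => if g i = 0 then min m ((((t:Nat)+1 : Nat) : Int) - 1 - (i : Int)) else m) m =
          (List.range t).foldl (fun m i => if g i = 0 then min m (((t : Int) - 1 - (i : Int)) + 1) else m) m := by
        intro m
        apply List.foldl_ext
        intro b a _
        have : (((t:Nat)+1 : Nat) : Int) - 1 - (a : Int) = ((t : Int) - 1 - (a : Int)) + 1 := by push_cast; ring
        rw [this]
      rw [hc]
      have hinit : ((10001 : Int) + (((t:Nat)+1 : Nat) : Int)) = (10001 + (t : Int)) + 1 := by push_cast; ring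
      rw [hinit]
      rw [show ∀ m : Int, (List.range t).foldl (fun m i => if g i = 0 then min m (((t : Int) - 1 - (i : Int)) + 1) else m) m =
          pvF (fun i => g i = 0) (fun i => ((t : Int) - 1 - (i : Int)) + 1) m (List.range t) from fun _ => rfl]
      rw [pvF_shift (fun i => g i = 0) (fun i => (t : Int) - 1 - (i : Int)) (List.range t) (10001 + (t:Int))]
      have hlast : (((t:Nat)+1 : Nat) : Int) - 1 - (t : Int) = 0 := by push_cast; ring
      rw [hlast]
      rfl
    rw [hstep, ih, hshift]
    have hm := pvMdl_nonneg g t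
    simp only [pvStep]
    split_ifs <;> omega

def pvRev (g : Nat → Int) (n : Nat) : Nat → Int := fun i => g (n - 1 - i)

-- the one-sided minima combine to the global one
theorem pvMd_split (g : Nat → Int) (n j : Nat) (hj : j < n) :
    pvMd g n j = min (min 10001 (pvMdl g (j + 1))) (min 10001 (pvMdl (pvRev g n) (n - j))) := by
  apply le_antisymm
  · apply le_min
    · rcases pvF_cases (fun i => g i = 0) (fun i => ((j:Nat)+1 : Int) - 1 - (i : Int))
        (List.range (j+1)) (10001 + ((j:Nat)+1 : Nat)) with h | ⟨i, hi, hpi, h⟩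
      · rw [show pvMdl g (j+1) = 10001 + (((j:Nat)+1 : Nat) : Int) from h]
        have := pvMd_le g n j
        omega
      · have hi' : i < j + 1 := List.mem_range.mp hi
        have h1 : pvMd g n j ≤ |(i : Int) - (j : Int)| :=
          pvF_le_mem _ _ _ _ i (List.mem_range.mpr (by omega)) hpi
        have h2 : |(i : Int) - (j : Int)| = (((j:Nat)+1 : Nat) : Int) - 1 - (i : Int) := by
          rw [abs_of_nonpos (by omega)]
          omega
        rw [show pvMdl g (j+1) = (((j:Nat)+1 : Nat) : Int) - 1 - (i : Int) from h]
        have := pvMd_le g n j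
        omega
    · rcases pvF_cases (fun i => pvRev g n i = 0) (fun i => (((n - j):Nat) : Int) - 1 - (i : Int))
        (List.range (n - j)) (10001 + ((n - j) : Nat)) with h | ⟨i', hi', hpi', h⟩
      · rw [show pvMdl (pvRev g n) (n - j) = 10001 + (((n-j) : Nat) : Int) from h]
        have := pvMd_le g n j
        omega
      · have hi'' : i' < n - j := List.mem_range.mp hi'
        have hreal : pvRev g n i' = g (n - 1 - i') := rfl
        have h1 : pvMd g n j ≤ |((n - 1 - i' : Nat) : Int) - (j : Int)| :=
          pvF_le_mem _ _ _ _ (n - 1 - i') (List.mem_range.mpr (by omega)) (by rw [← hreal]; exact hpi')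
        have h2 : |((n - 1 - i' : Nat) : Int) - (j : Int)| = (((n - j) : Nat) : Int) - 1 - (i' : Int) := by
          rw [abs_of_nonneg (by omega)]
          omega
        rw [show pvMdl (pvRev g n) (n - j) = (((n-j) : Nat) : Int) - 1 - (i' : Int) from h]
        have := pvMd_le g n j
        omega
  · rcases pvF_cases (fun i => g i = 0) (fun i => |(i : Int) - (j : Int)|)
      (List.range n) 10001 with h | ⟨i, hi, hpi, h⟩
    · rw [show pvMd g n j = 10001 from h]
      omega
    · have hin : i < n := List.mem_range.mp hi
      rw [show pvMd g n j = |(i : Int) - (j : Int)| from h]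
      by_cases hij : i ≤ j
      · have hL : pvMdl g (j+1) ≤ (((j:Nat)+1 : Nat) : Int) - 1 - (i : Int) :=
          pvF_le_mem _ _ _ _ i (List.mem_range.mpr (by omega)) hpi
        have h2 : |(i : Int) - (j : Int)| = (((j:Nat)+1 : Nat) : Int) - 1 - (i : Int) := by
          rw [abs_of_nonpos (by omega)]
          omega
        omega
      · have hi' : n - 1 - i < n - j := by omega
        have hpi' : pvRev g n (n - 1 - i) = 0 := by
          show g (n - 1 - (n - 1 - i)) = 0
          rw [show n - 1 - (n - 1 - i) = i from by omega]
          exact hpi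
        have hR : pvMdl (pvRev g n) (n - j) ≤ (((n - j) : Nat) : Int) - 1 - ((n - 1 - i : Nat) : Int) :=
          pvF_le_mem _ _ _ _ (n - 1 - i) (List.mem_range.mpr hi') hpi'
        have h2 : |(i : Int) - (j : Int)| = (((n - j) : Nat) : Int) - 1 - ((n - 1 - i : Nat) : Int) := by
          rw [abs_of_nonneg (by omega)]
          omega
        omega

-- pointwise value of B at a cell
theorem pvB_point (g : Nat → Int) (n j : Nat) (hj : j < n) :
    (if (if pvLd g (j+1) < pvLd (pvRev g n) (n - j) then pvLd g (j+1) else pvLd (pvRev g n) (n - j)) ≤ 9 ∨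
        10001 ≤ (if pvLd g (j+1) < pvLd (pvRev g n) (n - j) then pvLd g (j+1) else pvLd (pvRev g n) (n - j))
     then (if pvLd g (j+1) < pvLd (pvRev g n) (n - j) then pvLd g (j+1) else pvLd (pvRev g n) (n - j))
     else 9) = pvClip (pvMd g n j) := by
  rw [pvLd_eq, pvLd_eq, pvMd_split g n j hj]
  have hL := pvMdl_nonneg g (j+1)
  have hR := pvMdl_nonneg (pvRev g n) (n - j)
  generalize pvMdl g (j+1) = L at *
  generalize pvMdl (pvRev g n) (n - j) = R at *
  simp only [pvClip]
  split_ifs <;> omega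

-- the scan list of B's passes
def pvScanL : Int → List Int → List Int
  | _, [] => []
  | d0, v :: t => pvStep d0 v :: pvScanL (pvStep d0 v) t

theorem pvScanL_length (xs : List Int) : ∀ d0 : Int, (pvScanL d0 xs).length = xs.length := by
  induction xs with
  | nil => intro d0; rfl
  | cons v t ih => intro d0; simp [pvScanL, ih]

theorem pvScan_fold (xs : List Int) : ∀ (d0 : Int) (acc : List Int),
    xs.foldl (fun (p : Int × List Int) v => (pvStep p.1 v, p.2 ++ [pvStep p.1 v])) (d0, acc) =
      (xs.foldl pvStep d0, acc ++ pvScanL d0 xs) := by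
  induction xs with
  | nil => intro d0 acc; simp [pvScanL]
  | cons v t ih =>
    intro d0 acc
    simp only [List.foldl_cons, ih, pvScanL, List.append_assoc, List.singleton_append]

theorem pvScanL_getElem (xs : List Int) : ∀ (d0 : Int) (j : Nat) (hj : j < xs.length),
    (pvScanL d0 xs)[j]'(by rw [pvScanL_length]; exact hj) = (xs.take (j+1)).foldl pvStep d0 := by
  induction xs with
  | nil => intro d0 j hj; simp at hj
  | cons v t ih =>
    intro d0 j hj
    cases j with
    | zero => simp [pvScanL]
    | succ j => simpa [pvScanL] using ih (pvStep d0 v) j (by simpa using hj)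

theorem pvMapRange_reverse (n : Nat) (f : Nat → Int) :
    ((List.range n).map f).reverse = (List.range n).map (fun j => f (n - 1 - j)) := by
  apply List.ext_getElem (by simp)
  intro i h1 h2
  simp [List.getElem_reverse]

-- B's left pass over the prefix, as a map over range
theorem pvLeft_eq (g : Nat → Int) (n : Nat) :
    pvScanL 10001 ((List.range n).map g) = (List.range n).map (fun j => pvLd g (j+1)) := by
  apply List.ext_getElem (by simp [pvScanL_length])
  intro j h1 h2
  have hj : j < n := by simpa using h2
  rw [pvScanL_getElem _ _ _ (by simpa using hj), List.getElem_map, List.getElem_range,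
    ← List.map_take, List.take_range, show min (j+1) n = j+1 from by omega, List.foldl_map]
  rfl


theorem pvA_bridge (qtd : Int) (quadrados : List Int) :
    ordem_cores qtd quadrados = pvArun (fun i => quadrados.getD i 0) qtd.toNat := by
  unfold ordem_cores pvArun pvAStep
  rw [PySem.List.pyRange_one]
  simp [List.foldl_map, PySem.List.pyGetD_natCast, PySem.List.pySetD_natCast, Function.comp_def, List.map_const']

theorem pvFoldAppend {α β : Type} (l : List α) (f : α → β) :
    l.foldl (fun acc x => acc ++ [f x]) [] = l.map f := by
  rw [PySem.List.foldl_append_eq_flatMap]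
  exact (List.map_eq_flatMap).symm

theorem pvB_bridge (qtd : Int) (quadrados : List Int) :
    ordem_cores_alt qtd quadrados =
      (List.range qtd.toNat).map (fun j =>
        (if (if pvLd (fun i => quadrados.getD i 0) (j+1) < pvLd (pvRev (fun i => quadrados.getD i 0) qtd.toNat) (qtd.toNat - j) then pvLd (fun i => quadrados.getD i 0) (j+1) else pvLd (pvRev (fun i => quadrados.getD i 0) qtd.toNat) (qtd.toNat - j)) ≤ 9 ∨
            10001 ≤ (if pvLd (fun i => quadrados.getD i 0) (j+1) < pvLd (pvRev (fun i => quadrados.getD i 0) qtd.toNat) (qtd.toNat - j) then pvLd (fun i => quadrados.getD i 0) (j+1) else pvLd (pvRev (fun i => quadrados.getD i 0) qtd.toNat) (qtd.toNat - j))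
         then (if pvLd (fun i => quadrados.getD i 0) (j+1) < pvLd (pvRev (fun i => quadrados.getD i 0) qtd.toNat) (qtd.toNat - j) then pvLd (fun i => quadrados.getD i 0) (j+1) else pvLd (pvRev (fun i => quadrados.getD i 0) qtd.toNat) (qtd.toNat - j))
         else 9)) := by
  unfold ordem_cores_alt
  dsimp only
  rw [PySem.List.pyRange_one]
  rw [show (max qtd 0 - 0).toNat = qtd.toNat from by omega]
  set g : Nat → Int := fun i => quadrados.getD i 0 with hg
  set n : Nat := qtd.toNat with hn
  have hpre : (List.map (fun k : Nat => (0 : Int) + (k : Int)) (List.range n)).map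
      (fun i => PySem.List.pyGetD quadrados i 0) = (List.range n).map g := by
    rw [List.map_map]
    apply List.map_congr_left
    intro a _
    simp [hg]
  rw [hpre]
  rw [show (fun (p : Int × List Int) v =>
      ((if v = 0 then (0:Int) else if p.1 < 10001 then p.1 + 1 else p.1),
        p.2 ++ [if v = 0 then (0:Int) else if p.1 < 10001 then p.1 + 1 else p.1])) =
    (fun (p : Int × List Int) v => (pvStep p.1 v, p.2 ++ [pvStep p.1 v])) from rfl]
  rw [pvScan_fold, pvScan_fold, pvMapRange_reverse]
  rw [show (fun j => g (n - 1 - j)) = pvRev g n from rfl]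
  simp only [List.nil_append]
  rw [pvLeft_eq, pvLeft_eq, pvMapRange_reverse]
  have hright : (List.range n).map (fun j => pvLd (pvRev g n) (n - 1 - j + 1)) =
      (List.range n).map (fun j => pvLd (pvRev g n) (n - j)) := by
    apply List.map_congr_left
    intro a ha
    have : a < n := List.mem_range.mp ha
    rw [show n - 1 - a + 1 = n - a from by omega]
  rw [hright, List.zip_map']
  rw [pvFoldAppend, List.map_map]
  rfl

theorem pv_main (qtd : Int) (quadrados : List Int) :
    ordem_cores qtd quadrados = ordem_cores_alt qtd quadrados := by
  rw [pvA_bridge, pvB_bridge]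
  apply List.ext_getElem (by simp [pvArun_length])
  intro j h1 h2
  have hj : j < qtd.toNat := by simpa [pvArun_length] using h1
  rw [List.getElem_map, List.getElem_range]
  rw [← List.getD_eq_getElem (pvArun (fun i => quadrados.getD i 0) qtd.toNat) 0 h1]
  rw [pvArun_getD _ _ _ hj]
  exact (pvB_point _ _ _ hj).symm

-- ===== VERDICT (by name: the statement is the Claim_ definition above) =====
theorem ordem_cores_spec : Claim_equal_ordem_cores := by
  intro qtd_quadrados quadrados _ _
  unfold Spec_ordem_cores
  exact pv_main qtd_quadrados quadrados
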